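-- pv_equiv track=rewrite | github.com/pawelzar/python-snippets | Glass stacking/solution.py | glass_stacking
-- ===== SOURCE A (Python) =====
-- def glass_stacking(number):
--     """
--     Returns art composed of glasses stacked on top of each other
--     in a triangular shape.
--     Provided parameter is the maximum number of glasses that can be used
--     to form a stack.
--     """
--     count = 0
--     height = 0
--     glasses = []
--
--     while count + height < number:
--         height += 1
--         count += height
--
--     for i in range(1, height + 1):
--         for line in [' ***  ', ' * *  ', ' * *  ', '***** ']:
--             glasses.append('{:^{}}'.format(line * i, height * 6)[:-1])
--
--     return glasses
-- ===== SOURCE B (Python) =====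
-- GLASS = (' ***  ', ' * *  ', ' * *  ', '***** ')
--
--
-- def _isqrt(n):
--     # Newton's method integer square root (no imports allowed here).
--     if n <= 1:
--         return n
--     guess = n // 2
--     nxt = (guess + n // guess) // 2
--     while nxt < guess:
--         guess = nxt
--         nxt = (guess + n // guess) // 2
--     return guess
--
--
-- def glass_stacking(number):
--     """
--     Returns art composed of glasses stacked on top of each other
--     in a triangular shape.
--     Provided parameter is the maximum number of glasses that can be used
--     to form a stack.
--     """
--     if number <= 0:
--         return []
--     # smallest H with H*(H+3)/2 >= number, in closed form
--     s = _isqrt(8 * number + 9)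
--     height = (s - 1) // 2 - (1 if s * s == 8 * number + 9 else 0)
--     rows = []
--     for i in range(1, height + 1):
--         pad = ' ' * (3 * (height - i))
--         for line in GLASS:
--             rows.append(pad + line * (i - 1) + line[:5] + pad)
--     return rows
-- ===== Notes on version B (the rewrite author's own statement) =====
-- stated objective: alternative
-- what changed: The incremental while-loop computing the stack height is replaced by a closed-form solution of its quadratic stopping condition via a Newton integer square root, and each row is built by direct symmetric-padding arithmetic instead of format-centering the repeated glass and slicing off the last character.
import Mathlib
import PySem

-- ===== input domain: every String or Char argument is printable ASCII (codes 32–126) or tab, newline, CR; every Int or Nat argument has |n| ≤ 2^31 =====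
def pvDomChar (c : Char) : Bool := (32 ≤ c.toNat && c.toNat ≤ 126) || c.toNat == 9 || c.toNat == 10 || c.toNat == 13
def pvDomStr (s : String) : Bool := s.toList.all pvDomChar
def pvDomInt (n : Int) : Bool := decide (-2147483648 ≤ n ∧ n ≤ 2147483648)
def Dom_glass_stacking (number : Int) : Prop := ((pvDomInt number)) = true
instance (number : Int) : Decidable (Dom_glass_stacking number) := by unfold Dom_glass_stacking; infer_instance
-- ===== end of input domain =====

-- B replaces A's incremental while-loop for the stack height by a closed form using an
-- integer square root (Newton), and builds each row by direct symmetric padding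
-- arithmetic instead of format-centering and slicing; same return value everywhere.

-- ===== PORT A =====

-- Python 'str * int': the string repeated (empty for a non-positive count); exact.
def pyStrMul (s : List Char) (k : Int) : List Char :=
  List.flatten (List.replicate k.toNat s)

-- Python "'{:^{}}'.format(s, w)": centre s in width w filling with spaces; when padding
-- is odd the extra space goes to the RIGHT (left = pad // 2), exactly CPython's rule.
def pyCenter (s : List Char) (w : Int) : List Char :=
  let pad := w - (s.length : Int)
  if pad ≤ 0 then s
  else
    List.replicate (PySem.Int.floordiv pad 2).toNat ' ' ++ s ++
      List.replicate (pad - PySem.Int.floordiv pad 2).toNat ' '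

-- the while loop of A: 'while count + height < number: height += 1; count += height'
-- (fuel only makes the recursion total; it is proved ample below)
def glassHeightLoop : Nat → Int → Int → Int → Int
  | 0, _, _, height => height
  | fuel + 1, number, count, height =>
    if count + height < number then
      glassHeightLoop fuel number (count + height + 1) (height + 1)
    else height

def glass_stacking (number : Int) : List String :=
  let height := glassHeightLoop number.toNat number 0 0
  (PySem.List.pyRange 1 (height + 1) 1).foldl (fun glasses i =>
    [" ***  ", " * *  ", " * *  ", "***** "].foldl (fun glasses line =>
      glasses ++ [String.mk (PySem.List.slice
        (pyCenter (pyStrMul line.toList i) (height * 6)) none (some (-1)))]) glasses) []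

-- ===== PORT B =====

-- the while loop of Source B's _isqrt (fuel only makes the recursion total)
def glassIsqrtLoop : Nat → Int → Int → Int
  | 0, _, guess => guess
  | fuel + 1, n, guess =>
    let nxt := PySem.Int.floordiv (guess + PySem.Int.floordiv n guess) 2
    if nxt < guess then glassIsqrtLoop fuel n nxt else guess

def glassIsqrt (n : Int) : Int :=
  if n ≤ 1 then n
  else glassIsqrtLoop n.toNat n (PySem.Int.floordiv n 2)

def glassLines : List String := [" ***  ", " * *  ", " * *  ", "***** "]

def glass_stacking_alt (number : Int) : List String :=
  if number ≤ 0 then []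
  else
    let s := glassIsqrt (8 * number + 9)
    let height := PySem.Int.floordiv (s - 1) 2 -
      (if s * s = 8 * number + 9 then 1 else 0)
    (PySem.List.pyRange 1 (height + 1) 1).foldl (fun rows i =>
      let pad := List.replicate (3 * (height - i)).toNat ' '
      glassLines.foldl (fun rows line =>
        rows ++ [String.mk (pad ++ pyStrMul line.toList (i - 1) ++
          PySem.List.slice line.toList none (some 5) ++ pad)]) rows) []

-- ===== PRECONDITION & SPEC =====
def Spec_glass_stacking (number : Int) (out : List String) : Prop := out = glass_stacking_alt number
instance (number : Int) (out : List String) : Decidable (Spec_glass_stacking number out) := by unfold Spec_glass_stacking; infer_instance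

-- ===== CLAIM (what is proved, stated in full; the proofs are below) =====
def Claim_equal_glass_stacking : Prop := ∀ (number : Int), Dom_glass_stacking number → Spec_glass_stacking number (glass_stacking number)

-- ===== LEMMAS AND PROOFS =====

-- string * repetition: peel one copy off the end
theorem flatten_replicate_succ {α : Type} (k : Nat) (l : List α) :
    List.flatten (List.replicate (k + 1) l) = List.flatten (List.replicate k l) ++ l := by
  rw [List.replicate_succ', List.flatten_append]
  simp

theorem pyStrMul_succ (l : List Char) (i : Int) (hi : 1 ≤ i) :
    pyStrMul l i = pyStrMul l (i - 1) ++ l := by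
  unfold pyStrMul
  have : i.toNat = (i - 1).toNat + 1 := by omega
  rw [this, flatten_replicate_succ]

theorem length_pyStrMul (l : List Char) (i : Int) :
    (pyStrMul l i).length = i.toNat * l.length := by
  unfold pyStrMul
  simp [List.length_flatten]

theorem floordiv_two_exact (k : Int) : PySem.Int.floordiv (2 * k) 2 = k := by
  have h1 : k ≤ PySem.Int.floordiv (2 * k) 2 :=
    (PySem.Int.le_floordiv_iff_mul_le (by norm_num)).mpr (by ring_nf; omega)
  have h2 : PySem.Int.floordiv (2 * k) 2 < k + 1 :=
    (PySem.Int.floordiv_lt_iff_lt_mul (by norm_num)).mpr (by ring_nf; omega)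
  omega

theorem pyCenter_even (s : List Char) (k w : Int) (hk : 0 ≤ k)
    (hw : w = (s.length : Int) + 2 * k) :
    pyCenter s w = List.replicate k.toNat ' ' ++ s ++ List.replicate k.toNat ' ' := by
  unfold pyCenter
  by_cases hp : w - (s.length : Int) ≤ 0
  · have hk0 : k = 0 := by omega
    simp [hp, hk0]
  · have hpad : w - (s.length : Int) = 2 * k := by omega
    rw [hpad] at hp ⊢
    simp only [hp, if_false]
    rw [floordiv_two_exact]
    have h2 : 2 * k - k = k := by ring
    rw [h2]

-- the centred-then-trimmed row of A equals B's symmetric-padding row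
theorem row_eq (h i : Int) (hi1 : 1 ≤ i) (hih : i ≤ h)
    (line u : List Char) (hu : line = u ++ [' ']) (hu5 : u.length = 5) :
    PySem.List.slice (pyCenter (pyStrMul line i) (h * 6)) none (some (-1))
      = List.replicate (3 * (h - i)).toNat ' ' ++ pyStrMul line (i - 1) ++
        PySem.List.slice line none (some 5) ++ List.replicate (3 * (h - i)).toNat ' ' := by
  have hll : line.length = 6 := by rw [hu]; simp [hu5]
  have hlen : ((pyStrMul line i).length : Int) = 6 * i := by
    rw [length_pyStrMul, hll]; push_cast; omega
  rw [pyCenter_even _ (3 * (h - i)) _ (by omega) (by rw [hlen]; ring)]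
  rw [PySem.List.slice_to_neg_one]
  rw [PySem.List.slice_to line (by norm_num : (0:Int) ≤ 5)]
  rw [pyStrMul_succ line i hi1]
  have htake : line.take (5:Int).toNat = u := by
    have h5 : (5:Int).toNat = u.length := by omega
    rw [h5, hu, List.take_left]
  rw [htake]
  have key : ∀ (A : List Char) (c : Char) (p : Nat),
      (A ++ ([c] ++ List.replicate p c)).dropLast = A ++ List.replicate p c := by
    intro A c p
    have h1 : [c] ++ List.replicate p c = List.replicate p c ++ [c] := by
      rw [List.singleton_append, ← List.replicate_succ, List.replicate_succ']
    rw [h1, ← List.append_assoc, List.dropLast_concat]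
  have hassoc : List.replicate (3 * (h - i)).toNat ' ' ++ (pyStrMul line (i - 1) ++ line) ++
        List.replicate (3 * (h - i)).toNat ' '
      = (List.replicate (3 * (h - i)).toNat ' ' ++ pyStrMul line (i - 1) ++ u) ++
        ([' '] ++ List.replicate (3 * (h - i)).toNat ' ') := by
    rw [hu]; simp [List.append_assoc]
  rw [hassoc, key]

-- ===== A's while loop: characterisation =====
theorem glassHeightLoop_spec (fuel : Nat) : ∀ (n c h : Int), 0 ≤ h → 2 * c = h * (h + 1) →
    n ≤ c + h + fuel →
    (glassHeightLoop fuel n c h = h ∧ 2 * n ≤ h * (h + 3)) ∨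
    (h < glassHeightLoop fuel n c h ∧
      2 * n ≤ glassHeightLoop fuel n c h * (glassHeightLoop fuel n c h + 3) ∧
      (glassHeightLoop fuel n c h - 1) * (glassHeightLoop fuel n c h + 2) < 2 * n) := by
  induction fuel with
  | zero =>
    intro n c h h0 hinv hfuel
    left
    refine ⟨rfl, ?_⟩
    simp only [Nat.cast_zero, add_zero] at hfuel
    nlinarith
  | succ f ih =>
    intro n c h h0 hinv hfuel
    by_cases hc : c + h < n
    · have hrec := ih n (c + h + 1) (h + 1) (by omega) (by ring_nf; linarith) (by push_cast at hfuel ⊢; omega)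
      unfold glassHeightLoop
      rw [if_pos hc]
      rcases hrec with ⟨he, hbd⟩ | ⟨hgt, hb1, hb2⟩
      · right
        rw [he]
        refine ⟨by omega, by nlinarith, by nlinarith⟩
      · right
        exact ⟨by omega, hb1, hb2⟩
    · unfold glassHeightLoop
      rw [if_neg hc]
      left
      exact ⟨rfl, by nlinarith [not_lt.mp hc]⟩

theorem glassHeightLoop_nonpos (fuel : Nat) (n : Int) (hn : n ≤ 0) :
    glassHeightLoop fuel n 0 0 = 0 := by
  cases fuel with
  | zero => rfl
  | succ f =>
    have hc : ¬ ((0 : Int) + 0 < n) := by omega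
    unfold glassHeightLoop
    rw [if_neg hc]

-- ===== B's Newton loop: characterisation =====
theorem glassIsqrtLoop_spec (fuel : Nat) : ∀ (n g : Int), 1 ≤ n → 1 ≤ g →
    (∀ r : Int, 0 ≤ r → r * r ≤ n → r ≤ g) → g ≤ (fuel : Int) →
    1 ≤ glassIsqrtLoop fuel n g ∧ glassIsqrtLoop fuel n g * glassIsqrtLoop fuel n g ≤ n ∧
      (∀ r : Int, 0 ≤ r → r * r ≤ n → r ≤ glassIsqrtLoop fuel n g) := by
  induction fuel with
  | zero =>
    intro n g hn hg hub hfuel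
    exfalso
    simp only [Nat.cast_zero] at hfuel
    omega
  | succ f ih =>
    intro n g hn hg hub hfuel
    have hgpos : (0 : Int) < g := by omega
    have hub_nxt : ∀ r : Int, 0 ≤ r → r * r ≤ n →
        r ≤ PySem.Int.floordiv (g + PySem.Int.floordiv n g) 2 := by
      intro r hr hrn
      have h1 : 2 * r - g ≤ PySem.Int.floordiv n g :=
        (PySem.Int.le_floordiv_iff_mul_le hgpos).mpr (by nlinarith [sq_nonneg (r - g)])
      exact (PySem.Int.le_floordiv_iff_mul_le (by norm_num)).mpr (by nlinarith)
    unfold glassIsqrtLoop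
    by_cases hlt : PySem.Int.floordiv (g + PySem.Int.floordiv n g) 2 < g
    · simp only [hlt, if_true]
      have hnxt1 : 1 ≤ PySem.Int.floordiv (g + PySem.Int.floordiv n g) 2 :=
        hub_nxt 1 (by norm_num) (by nlinarith)
      exact ih n _ hn hnxt1 hub_nxt (by push_cast at hfuel ⊢; omega)
    · simp only [hlt, if_false]
      refine ⟨hg, ?_, hub⟩
      by_contra hgg
      push Not at hgg
      have hfd : PySem.Int.floordiv n g < g :=
        (PySem.Int.floordiv_lt_iff_lt_mul hgpos).mpr (by nlinarith)
      have : PySem.Int.floordiv (g + PySem.Int.floordiv n g) 2 < g :=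
        (PySem.Int.floordiv_lt_iff_lt_mul (by norm_num)).mpr (by omega)
      exact hlt this

theorem glassIsqrt_spec (n : Int) (hn : 2 ≤ n) :
    1 ≤ glassIsqrt n ∧ glassIsqrt n * glassIsqrt n ≤ n ∧
      n < (glassIsqrt n + 1) * (glassIsqrt n + 1) := by
  have hn1 : ¬ (n ≤ 1) := by omega
  unfold glassIsqrt
  rw [if_neg hn1]
  have hg1 : 1 ≤ PySem.Int.floordiv n 2 :=
    (PySem.Int.le_floordiv_iff_mul_le (by norm_num)).mpr (by omega)
  have hub : ∀ r : Int, 0 ≤ r → r * r ≤ n → r ≤ PySem.Int.floordiv n 2 := by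
    intro r hr hrn
    refine (PySem.Int.le_floordiv_iff_mul_le (by norm_num)).mpr ?_
    by_cases h1 : r ≤ 1
    · nlinarith
    · nlinarith
  have hfuel : PySem.Int.floordiv n 2 ≤ (n.toNat : Int) := by
    have h' : PySem.Int.floordiv n 2 < n + 1 :=
      (PySem.Int.floordiv_lt_iff_lt_mul (by norm_num)).mpr (by omega)
    omega
  obtain ⟨h1, h2, h3⟩ := glassIsqrtLoop_spec n.toNat n (PySem.Int.floordiv n 2)
    (by omega) hg1 hub hfuel
  refine ⟨h1, h2, ?_⟩
  by_contra hcon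
  push Not at hcon
  have := h3 _ (by omega) hcon
  omega

-- ===== the two heights agree =====
theorem heightP_unique (n a b : Int) (ha1 : 1 ≤ a) (ha2 : 2 * n ≤ a * (a + 3))
    (ha3 : (a - 1) * (a + 2) < 2 * n) (hb1 : 1 ≤ b) (hb2 : 2 * n ≤ b * (b + 3))
    (hb3 : (b - 1) * (b + 2) < 2 * n) : a = b := by
  rcases lt_trichotomy a b with hab | hab | hab
  · nlinarith
  · exact hab
  · nlinarith

def glassHeightB (n : Int) : Int :=
  PySem.Int.floordiv (glassIsqrt (8 * n + 9) - 1) 2 -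
    (if glassIsqrt (8 * n + 9) * glassIsqrt (8 * n + 9) = 8 * n + 9 then 1 else 0)

theorem glassHeightB_spec (n : Int) (hn : 1 ≤ n) :
    1 ≤ glassHeightB n ∧ 2 * n ≤ glassHeightB n * (glassHeightB n + 3) ∧
      (glassHeightB n - 1) * (glassHeightB n + 2) < 2 * n := by
  obtain ⟨hs1, hs2, hs3⟩ := glassIsqrt_spec (8 * n + 9) (by omega)
  unfold glassHeightB
  set s := glassIsqrt (8 * n + 9) with hs
  set q := PySem.Int.floordiv (s - 1) 2 with hq
  have hdm := PySem.Int.floordiv_mul_add_mod (s - 1) 2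
  have hm2 := PySem.Int.mod_two_eq (s - 1)
  rw [← hq] at hdm
  by_cases hsq : s * s = 8 * n + 9
  · rw [if_pos hsq]
    -- s is odd: s*s is odd, so (s-1) is even and s = 2q+1
    have hsodd : PySem.Int.mod (s - 1) 2 = 0 := by
      rcases hm2 with h0 | h1
      · exact h0
      · exfalso
        have hse : s = 2 * q + 2 := by omega
        have : (2 * q + 2) * (2 * q + 2) = 8 * n + 9 := by rw [← hse]; exact hsq
        have h4 : 4 * (q * q + 2 * q + 1) = 8 * n + 9 := by nlinarith
        omega
    have hse : s = 2 * q + 1 := by omega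
    have h2n : q * q + q - 2 = 2 * n := by nlinarith
    have hs5 : 5 ≤ s := by nlinarith
    have hq2 : 2 ≤ q := by omega
    refine ⟨by omega, by nlinarith, by nlinarith⟩
  · rw [if_neg hsq]
    have hlt : s * s < 8 * n + 9 := lt_of_le_of_ne hs2 hsq
    have hm01 : PySem.Int.mod (s - 1) 2 = 0 ∨ PySem.Int.mod (s - 1) 2 = 1 := hm2
    have hs4 : 4 ≤ s := by nlinarith
    have hq1 : 1 ≤ q := by omega
    have hub : 2 * q + 1 ≤ s := by omega
    have hlb : s + 1 ≤ 2 * q + 3 := by omega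
    refine ⟨by omega, by nlinarith, by nlinarith⟩

theorem height_eq (n : Int) (hn : 1 ≤ n) :
    glassHeightLoop n.toNat n 0 0 = glassHeightB n := by
  have hs := glassHeightLoop_spec n.toNat n 0 0 (le_refl 0) (by ring) (by omega)
  have hb := glassHeightB_spec n hn
  rcases hs with ⟨he, hbd⟩ | ⟨h1, h2, h3⟩
  · exfalso; nlinarith [hbd, he ▸ hbd]
  · exact heightP_unique n _ _ (by omega) h2 h3 hb.1 hb.2.1 hb.2.2

-- ===== VERDICT (by name: the statement is the Claim_ definition above) =====
theorem glass_stacking_spec : Claim_equal_glass_stacking := by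
  intro number _
  unfold Spec_glass_stacking
  by_cases hn : number ≤ 0
  · unfold glass_stacking glass_stacking_alt
    rw [if_pos hn]
    simp only []
    rw [glassHeightLoop_nonpos _ _ hn,
      PySem.List.pyRange_one_eq_nil (a := 1) (b := 0 + 1) (by norm_num)]
    rfl
  · have hn1 : 1 ≤ number := by omega
    unfold glass_stacking glass_stacking_alt glassLines
    rw [if_neg hn]
    simp only []
    have hB : PySem.Int.floordiv (glassIsqrt (8 * number + 9) - 1) 2 -
        (if glassIsqrt (8 * number + 9) * glassIsqrt (8 * number + 9) = 8 * number + 9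
          then 1 else 0) = glassHeightB number := rfl
    rw [hB, height_eq number hn1]
    simp only [PySem.List.foldl_append_singleton_eq_map, PySem.List.foldl_append_eq_flatMap,
      List.nil_append, List.flatMap_def]
    apply congrArg List.flatten
    apply List.map_congr_left
    intro i hi
    obtain ⟨hi1, hi2⟩ := PySem.List.mem_pyRange_one.mp hi
    have hih : i ≤ glassHeightB number := by omega
    simp only [List.map]
    congr 1
    · exact congrArg String.mk (row_eq _ i hi1 hih _ [' ', '*', '*', '*', ' '] rfl rfl)
    congr 1
    · exact congrArg String.mk (row_eq _ i hi1 hih _ [' ', '*', ' ', '*', ' '] rfl rfl)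
    congr 1
    · exact congrArg String.mk (row_eq _ i hi1 hih _ [' ', '*', ' ', '*', ' '] rfl rfl)
    congr 1
    · exact congrArg String.mk (row_eq _ i hi1 hih _ ['*', '*', '*', '*', '*'] rfl rfl)
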